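-- pv_equiv track=rewrite | github.com/DoltD1no/RUC | bot.py | generate_username_letters
-- ===== SOURCE A (Python) =====
-- import string
--
-- def generate_username_letters(current_number, length):
--     """Generates a letter-only username from a number."""
--     alphabet = string.ascii_lowercase
--     result = ""
--     num = current_number
--
--     for _ in range(length):
--         result = alphabet[num % 26] + result
--         num //= 26
--
--     return result
-- ===== SOURCE B (Python) =====
-- import string
--
-- def generate_username_letters(current_number, length):
--     """Generates a letter-only username from a number."""
--     alphabet = string.ascii_lowercase
--
--     def render(n, d):
--         # d base-26 digits of n, most-significant first, by divide and conquer: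
--         # split at the midpoint with one divmod (floor semantics, so the
--         # remainder is the exact low-digit block even for negative n).
--         if d <= 0:
--             return ""
--         if d == 1:
--             return alphabet[n % 26]
--         half = d // 2
--         q, r = divmod(n, 26 ** half)
--         return render(q, d - half) + render(r, half)
--
--     return render(current_number, length)
-- ===== Notes on version B (the rewrite author's own statement) =====
-- stated objective: faster
-- what changed: B renders the fixed-width base-26 string by divide and conquer: one divmod at the digit midpoint splits the number into a high and a low block, each rendered recursively and concatenated, instead of A's sequential loop that threads a running quotient num //= 26 and prepends one character per step (re-copying the growing string each iteration).
import Mathlib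
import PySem

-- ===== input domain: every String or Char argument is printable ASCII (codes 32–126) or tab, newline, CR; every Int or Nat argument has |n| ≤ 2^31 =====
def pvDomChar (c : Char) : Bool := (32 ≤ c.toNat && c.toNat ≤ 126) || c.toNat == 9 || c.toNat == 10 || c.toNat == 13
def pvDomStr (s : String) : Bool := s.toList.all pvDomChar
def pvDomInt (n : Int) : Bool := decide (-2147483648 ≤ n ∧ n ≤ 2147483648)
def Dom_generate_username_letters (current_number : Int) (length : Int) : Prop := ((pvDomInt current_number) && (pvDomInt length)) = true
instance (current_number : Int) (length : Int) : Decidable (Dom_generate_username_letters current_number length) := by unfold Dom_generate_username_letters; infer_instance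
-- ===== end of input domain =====

-- B renders the fixed-width base-26 string by divide and conquer (one divmod splits the number
-- at the digit midpoint into a high and a low block, each rendered recursively) instead of A's
-- sequential loop threading a running quotient and prepending one character per step.

-- ===== PORT A =====
-- alphabet = string.ascii_lowercase
def pvAlphabet : List Char := "abcdefghijklmnopqrstuvwxyz".toList

-- for _ in range(length): result = alphabet[num % 26] + result; num //= 26
-- (range(length) performs length.toNat iterations; num % 26 is always in [0, 26), so the
--  indexing never raises and getD with a dummy default is exact)
def pvALoop : Nat → Int → List Char → List Char
  | 0, _, res => res
  | k+1, num, res =>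
      pvALoop k (PySem.Int.floordiv num 26)
        (pvAlphabet.getD (PySem.Int.mod num 26).toNat ' ' :: res)

def generate_username_letters (current_number : Int) (length : Int) : String :=
  String.ofList (pvALoop length.toNat current_number [])

-- ===== PORT B =====
-- def render(n, d): if d <= 0: ""; if d == 1: alphabet[n % 26];
--   half = d // 2; q, r = divmod(n, 26 ** half); render(q, d - half) + render(r, half)
-- (when this branch runs, half = d // 2 ≥ 1, so Python's 26 ** half is 26 ^ half.toNat exactly)
def pvRender (n : Int) (d : Int) : List Char :=
  if d ≤ 0 then []
  else if d = 1 then [pvAlphabet.getD (PySem.Int.mod n 26).toNat ' ']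
  else
    let half := PySem.Int.floordiv d 2
    let q := PySem.Int.floordiv n ((26 : Int) ^ half.toNat)
    let r := PySem.Int.mod n ((26 : Int) ^ half.toNat)
    pvRender q (d - half) ++ pvRender r half
termination_by d.toNat
decreasing_by
  · have h2 : PySem.Int.floordiv d 2 = d / 2 := PySem.Int.floordiv_eq_ediv_of_pos (by norm_num)
    rw [h2]; omega
  · have h2 : PySem.Int.floordiv d 2 = d / 2 := PySem.Int.floordiv_eq_ediv_of_pos (by norm_num)
    rw [h2]; omega

def generate_username_letters_alt (current_number : Int) (length : Int) : String :=
  String.ofList (pvRender current_number length)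

-- ===== PRECONDITION & SPEC =====
def Spec_generate_username_letters (current_number : Int) (length : Int) (out : String) : Prop := out = generate_username_letters_alt current_number length
instance (current_number : Int) (length : Int) (out : String) : Decidable (Spec_generate_username_letters current_number length out) := by unfold Spec_generate_username_letters; infer_instance

-- ===== CLAIM =====
def Claim_equal_generate_username_letters : Prop := ∀ (current_number : Int) (length : Int), Dom_generate_username_letters current_number length → Spec_generate_username_letters current_number length (generate_username_letters current_number length)

-- ===== LEMMAS AND PROOFS =====

-- the character both programs emit for a running quotient q
def pvCh (q : Int) : Char := pvAlphabet.getD (PySem.Int.mod q 26).toNat ' '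

-- the closed form both sides are reduced to: digit i (most-significant first) of D digits
def pvDigits (n : Int) (D : Nat) : List Char :=
  (List.range D).map (fun i => pvCh (PySem.Int.floordiv n ((26 : Int) ^ (D - 1 - i))))

theorem pvFd_pow (n : Int) (h k : Nat) :
    PySem.Int.floordiv (PySem.Int.floordiv n ((26 : Int) ^ h)) ((26 : Int) ^ k)
      = PySem.Int.floordiv n ((26 : Int) ^ (h + k)) := by
  show (Int.fdiv (Int.fdiv n _) _) = Int.fdiv n _
  rw [Int.fdiv_fdiv_eq_fdiv_mul n (by positivity) (by positivity), pow_add]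

-- A's loop computes the closed form
theorem pvALoop_closed (L : Nat) (n : Int) (res : List Char) :
    pvALoop L n res = pvDigits n L ++ res := by
  induction L generalizing n res with
  | zero => simp [pvALoop, pvDigits]
  | succ L ih =>
      show pvALoop L (PySem.Int.floordiv n 26) (pvCh n :: res) = _
      rw [ih]
      unfold pvDigits
      rw [List.range_succ, List.map_append]
      have h1 : (List.range L).map
            (fun i => pvCh (PySem.Int.floordiv (PySem.Int.floordiv n 26) ((26:Int) ^ (L - 1 - i))))
          = (List.range L).map
            (fun i => pvCh (PySem.Int.floordiv n ((26:Int) ^ (L + 1 - 1 - i)))) := by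
        apply List.map_congr_left
        intro i hi
        rw [List.mem_range] at hi
        have h26 : PySem.Int.floordiv n 26 = PySem.Int.floordiv n ((26:Int) ^ 1) := by norm_num
        rw [h26, pvFd_pow]
        have he : 1 + (L - 1 - i) = L + 1 - 1 - i := by omega
        rw [he]
      rw [h1]
      have h2 : pvCh (PySem.Int.floordiv n ((26:Int) ^ (L + 1 - 1 - L))) = pvCh n := by
        have : L + 1 - 1 - L = 0 := by omega
        rw [this]
        show pvCh (Int.fdiv n ((26:Int)^0)) = pvCh n
        simp [Int.fdiv_one]
      simp only [List.map_cons, List.map_nil, h2, List.append_assoc, List.singleton_append]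

-- low digits of n are the digits of its remainder: (n // 26^j) % 26 = (r // 26^j) % 26 for j < h
theorem pvLow_digit (n : Int) (h j : Nat) (hj : j < h) :
    pvCh (PySem.Int.floordiv n ((26:Int) ^ j))
      = pvCh (PySem.Int.floordiv (PySem.Int.mod n ((26:Int) ^ h)) ((26:Int) ^ j)) := by
  have hq := PySem.Int.floordiv_mul_add_mod n ((26:Int) ^ h)
  set q := PySem.Int.floordiv n ((26:Int) ^ h) with hqdef
  set r := PySem.Int.mod n ((26:Int) ^ h) with hrdef
  -- n = q * 26^h + r ; with 26^j ∣ 26^h the division distributes and the extra term kills mod 26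
  have hpowj : (0:Int) < (26:Int) ^ j := by positivity
  have hsplit : (26:Int) ^ h = (26:Int) ^ (h - 1 - j) * 26 * (26:Int) ^ j := by
    rw [mul_assoc, ← pow_succ', ← pow_add]
    congr 1
    omega
  have hdiv : PySem.Int.floordiv n ((26:Int) ^ j)
      = PySem.Int.floordiv r ((26:Int) ^ j) + q * ((26:Int) ^ (h - 1 - j) * 26) := by
    rw [PySem.Int.floordiv_eq_ediv_of_pos hpowj, PySem.Int.floordiv_eq_ediv_of_pos hpowj]
    have : n = r + q * ((26:Int) ^ (h - 1 - j) * 26) * (26:Int) ^ j := by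
      rw [← hq, hsplit]; ring
    rw [this, Int.add_mul_ediv_right _ _ (ne_of_gt hpowj)]
  unfold pvCh
  rw [hdiv]
  congr 2
  show PySem.Int.mod _ 26 = PySem.Int.mod _ 26
  rw [PySem.Int.mod_eq_emod_of_pos (by norm_num), PySem.Int.mod_eq_emod_of_pos (by norm_num)]
  have hre : PySem.Int.floordiv r ((26:Int) ^ j) + q * ((26:Int) ^ (h - 1 - j) * 26)
      = PySem.Int.floordiv r ((26:Int) ^ j) + q * (26:Int) ^ (h - 1 - j) * 26 := by ring
  rw [hre]
  exact Int.add_mul_emod_self_right _ _ _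

-- B's divide and conquer computes the closed form
theorem pvRender_closed (n d : Int) :
    pvRender n d = pvDigits n d.toNat := by
  induction n, d using pvRender.induct with
  | case1 n d hle =>
      rw [pvRender]
      simp [hle, pvDigits, Int.toNat_of_nonpos hle]
  | case2 n h1 =>
      rw [pvRender]
      norm_num
      simp [pvDigits, pvCh, List.range_succ, PySem.Int.mod, PySem.Int.floordiv,
        Int.fdiv_one, Int.fmod_eq_emod_of_nonneg]
  | case3 n d hle h1 half q r ihq ihr =>
      rw [pvRender]
      rw [if_neg hle, if_neg h1]
      show pvRender q (d - half) ++ pvRender r half = _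
      rw [ihq, ihr]
      have hhalf : half = d / 2 := PySem.Int.floordiv_eq_ediv_of_pos (by norm_num)
      set D := d.toNat with hD
      set h := half.toNat with hh
      have hh1 : 1 ≤ h := by omega
      have hhD : h < D := by omega
      have hdh : (d - half).toNat = D - h := by omega
      rw [hdh]
      have hq : q = PySem.Int.floordiv n ((26:Int) ^ h) := rfl
      have hr : r = PySem.Int.mod n ((26:Int) ^ h) := rfl
      unfold pvDigits
      rw [show List.range D = List.range (D - h) ++ (List.range h).map (fun x => (D - h) + x) by
            rw [← List.range_add]; congr 1; omega]
      rw [List.map_append, List.map_map]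
      congr 1
      · -- high block: digits of q = n // 26^h
        apply List.map_congr_left
        intro i hi
        rw [List.mem_range] at hi
        rw [hq, pvFd_pow]
        have he : h + (D - h - 1 - i) = D - 1 - i := by omega
        rw [he]
      · -- low block: digits of r = n % 26^h
        apply List.map_congr_left
        intro i hi
        rw [List.mem_range] at hi
        simp only [Function.comp_apply]
        have he : D - 1 - ((D - h) + i) = h - 1 - i := by omega
        rw [he, hr]
        exact (pvLow_digit n h (h - 1 - i) (by omega)).symm

-- ===== VERDICT =====
theorem generate_username_letters_spec : Claim_equal_generate_username_letters := by
  intro cn len _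
  unfold Spec_generate_username_letters generate_username_letters generate_username_letters_alt
  rw [pvALoop_closed, pvRender_closed]
  simp
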